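-- pv_equiv track=rewrite | github.com/openKG-field/kgbook-2020 | chapter5/5.2.2_TextClassification/gongxian/sysWordCluster.py | deal_dict
-- ===== SOURCE A (Python) =====
-- def deal_dict(word_dict, result_dict):
--     if len(word_dict) >= 2:
--         key = list(word_dict.keys())[0]
--         key_list = word_dict[key]
--         word_dict.pop(key)
--         outword = []
--         output = ''
--         outword.append(key)
--         for alpha in word_dict:
--             if key in word_dict[alpha] and alpha in key_list:
--                 outword.append(alpha)
--                 for a in word_dict[alpha]:
--                     if a not in key_list:
--                         key_list.append(a)
--         for out in outword:
--             output += out + ' '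
--         if output != '':
--             result_dict[output] = key_list
--         if len(outword) != 1:
--             for c in outword:
--                 if c != key:
--                     word_dict.pop(c)
--         result_dict = deal_dict(word_dict, result_dict)
--     elif len(word_dict) == 1:
--         key = list(word_dict.keys())[0]
--         key_list = word_dict[key]
--         result_dict[key] = key_list
--     return result_dict
-- ===== SOURCE B (Python) =====
-- def deal_dict(word_dict, result_dict):
--     # Iterative worklist with auxiliary sets (key_set, clustered) kept in
--     # sync with the order-preserving lists, so no membership test scans a list.
--     # Note: A empties word_dict in place; B leaves word_dict untouched
--     # (return value and result_dict mutation are identical).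
--     items = list(word_dict.items())
--     while items:
--         (key, vals), rest = items[0], items[1:]
--         if not rest:
--             result_dict[key] = vals
--             break
--         key_list = list(vals)
--         key_set = set(key_list)
--         outword = [key]
--         clustered = set()
--         for alpha, alist in rest:
--             if key in alist and alpha in key_set:
--                 outword.append(alpha)
--                 clustered.add(alpha)
--                 for a in alist:
--                     if a not in key_set:
--                         key_list.append(a)
--                         key_set.add(a)
--         result_dict[' '.join(outword) + ' '] = key_list
--         items = [p for p in rest if p[0] not in clustered]
--     return result_dict
-- ===== Notes on version B (the rewrite author's own statement) =====
-- stated objective: alternative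
-- what changed: Recursion on a dict that is emptied in place is replaced by an iterative worklist over the item list, with hash sets (key_set, clustered) maintained alongside the order-preserving lists so membership tests need no list scan.
import Mathlib
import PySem

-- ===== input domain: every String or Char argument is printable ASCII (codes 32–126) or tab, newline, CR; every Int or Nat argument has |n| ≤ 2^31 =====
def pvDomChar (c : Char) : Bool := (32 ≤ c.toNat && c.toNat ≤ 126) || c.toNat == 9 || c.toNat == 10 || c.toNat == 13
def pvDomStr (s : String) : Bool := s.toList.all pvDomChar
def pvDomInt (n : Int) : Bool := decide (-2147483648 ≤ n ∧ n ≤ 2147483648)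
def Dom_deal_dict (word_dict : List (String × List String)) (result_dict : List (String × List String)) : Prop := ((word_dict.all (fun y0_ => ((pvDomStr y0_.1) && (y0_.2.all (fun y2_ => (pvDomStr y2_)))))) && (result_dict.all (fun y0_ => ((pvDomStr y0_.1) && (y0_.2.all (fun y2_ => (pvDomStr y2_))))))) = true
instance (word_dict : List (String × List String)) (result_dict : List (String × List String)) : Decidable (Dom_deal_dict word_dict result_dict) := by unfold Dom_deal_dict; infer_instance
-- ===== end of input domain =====

-- B replaces A's recursion on a dict emptied in place by an iterative worklist with
-- hash sets kept in sync with the order-preserving lists (alternative decomposition).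
-- A empties word_dict in place and B does not touch it; the returned result_dict is identical.

-- ===== PORT A =====
-- inner loop 'for a in word_dict[alpha]: if a not in key_list: key_list.append(a)'
def aInner (kl : List String) (al : List String) : List String :=
  List.foldl (fun kl a => if a ∉ kl then kl ++ [a] else kl) kl al

-- one iteration of 'for alpha in word_dict:' on the state (outword, key_list)
def aStep (key : String) (wd1 : PySem.Dict String (List String))
    (st : List String × List String) (alpha : String) : List String × List String :=
  if key ∈ PySem.Dict.getD wd1 alpha [] ∧ alpha ∈ st.2 then
    (st.1 ++ [alpha], aInner st.2 (PySem.Dict.getD wd1 alpha []))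
  else st

def aPass (key : String) (wd1 : PySem.Dict String (List String))
    (st : List String × List String) (alphas : List String) : List String × List String :=
  List.foldl (aStep key wd1) st alphas

-- 'for out in outword: output += out + " "'
def aOut (ws : List String) : String :=
  List.foldl (fun o out => o ++ out ++ " ") "" ws

-- 'for c in outword: if c != key: word_dict.pop(c)'
def aPops (key : String) (d : PySem.Dict String (List String)) (cs : List String) :
    PySem.Dict String (List String) :=
  List.foldl (fun d c => if c ≠ key then PySem.Dict.erase d c else d) d cs

-- termination facts for A's recursion (cited in decreasing_by)
theorem aPops_le (key : String) (cs : List String) (d : PySem.Dict String (List String)) :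
    (aPops key d cs).items.length ≤ d.items.length := by
  induction cs generalizing d with
  | nil => simp [aPops]
  | cons c cs ih =>
    simp only [aPops, List.foldl_cons] at *
    refine le_trans (ih _) ?_
    split
    · exact List.length_filter_le _ _
    · exact le_rfl

theorem erase_head_lt (d : PySem.Dict String (List String)) (h : 2 ≤ d.items.length) :
    (PySem.Dict.erase d ((PySem.Dict.keys d).headD "")).items.length < d.items.length := by
  rcases d with ⟨items⟩
  cases items with
  | nil => simp at h
  | cons p t =>
    have he : (PySem.Dict.erase ⟨p :: t⟩ ((PySem.Dict.keys ⟨p :: t⟩).headD "")).items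
        = t.filter (fun q => !(q.1 == p.1)) := by
      simp [PySem.Dict.erase, PySem.Dict.keys]
    rw [he]
    exact Nat.lt_succ_of_le (List.length_filter_le _ _)

def deal_dict_go (wd rd : PySem.Dict String (List String)) : PySem.Dict String (List String) :=
  if 2 ≤ PySem.Dict.size wd then
    let key := (PySem.Dict.keys wd).headD ""
    let key_list := PySem.Dict.getD wd key []
    let wd1 := PySem.Dict.erase wd key
    let st := aPass key wd1 ([key], key_list) (PySem.Dict.keys wd1)
    let output := aOut st.1
    let rd1 := if output ≠ "" then PySem.Dict.insert rd output st.2 else rd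
    let wd2 := if st.1.length ≠ 1 then aPops key wd1 st.1 else wd1
    deal_dict_go wd2 rd1
  else if PySem.Dict.size wd = 1 then
    PySem.Dict.insert rd ((PySem.Dict.keys wd).headD "")
      (PySem.Dict.getD wd ((PySem.Dict.keys wd).headD "") [])
  else rd
termination_by wd.items.length
decreasing_by
  have h1 := erase_head_lt wd (by simpa [PySem.Dict.size] using ‹2 ≤ PySem.Dict.size wd›)
  split
  · exact Nat.lt_of_le_of_lt (aPops_le _ _ _) h1
  · exact h1

def deal_dict (word_dict : List (String × List String)) (result_dict : List (String × List String)) : List (String × List String) :=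
  (deal_dict_go ⟨word_dict⟩ ⟨result_dict⟩).items

-- ===== PORT B =====
-- 'for a in alist: if a not in key_set: key_list.append(a); key_set.add(a)'
def bInnerStep (q : List String × PySem.Set String) (a : String) : List String × PySem.Set String :=
  if PySem.Set.contains q.2 a then q else (q.1 ++ [a], PySem.Set.add q.2 a)

-- one iteration over a pair (alpha, alist); state = (outword, key_list, key_set, clustered)
def bStep (key : String)
    (st : List String × List String × PySem.Set String × PySem.Set String)
    (p : String × List String) :
    List String × List String × PySem.Set String × PySem.Set String :=
  if key ∈ p.2 ∧ PySem.Set.contains st.2.2.1 p.1 then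
    let q := List.foldl bInnerStep (st.2.1, st.2.2.1) p.2
    (st.1 ++ [p.1], q.1, q.2, PySem.Set.add st.2.2.2 p.1)
  else st

def bPass (key : String)
    (st : List String × List String × PySem.Set String × PySem.Set String)
    (ps : List (String × List String)) :
    List String × List String × PySem.Set String × PySem.Set String :=
  List.foldl (bStep key) st ps

def deal_dict_alt_go : List (String × List String) → PySem.Dict String (List String) →
    PySem.Dict String (List String)
  | [], rd => rd
  | (key, vals) :: rest, rd =>
    if rest = [] then PySem.Dict.insert rd key vals
    else
      let st := bPass key ([key], vals, PySem.Set.ofList vals, PySem.Set.empty) rest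
      let rd1 := PySem.Dict.insert rd (PySem.Str.join " " st.1 ++ " ") st.2.1
      deal_dict_alt_go (rest.filter (fun q => !(PySem.Set.contains st.2.2.2 q.1))) rd1
termination_by items _ => items.length
decreasing_by
  simp only [List.length_unattach]
  exact Nat.lt_succ_of_le (le_trans (List.length_filter_le _ _) (by simp))

def deal_dict_alt (word_dict : List (String × List String)) (result_dict : List (String × List String)) : List (String × List String) :=
  (deal_dict_alt_go word_dict ⟨result_dict⟩).items

-- ===== PRECONDITION & SPEC =====
-- Pre_ excludes association lists with duplicate word_dict keys: no Python dict can
-- represent them, so they correspond to no input A is ever run on.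
def Pre_deal_dict (word_dict : List (String × List String)) (result_dict : List (String × List String)) : Prop :=
  (word_dict.map Prod.fst).Nodup
instance (word_dict : List (String × List String)) (result_dict : List (String × List String)) : Decidable (Pre_deal_dict word_dict result_dict) := by unfold Pre_deal_dict; infer_instance

def pvWitness_deal_dict : (List (String × List String)) × (List (String × List String)) :=
  ([("a", ["b", "c"]), ("b", ["a"]), ("c", ["d"])], [("z", ["y"])])

def Spec_deal_dict (word_dict : List (String × List String)) (result_dict : List (String × List String)) (out : List (String × List String)) : Prop := out = deal_dict_alt word_dict result_dict
instance (word_dict : List (String × List String)) (result_dict : List (String × List String)) (out : List (String × List String)) : Decidable (Spec_deal_dict word_dict result_dict out) := by unfold Spec_deal_dict; infer_instance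

-- ===== CLAIM (what is proved, stated in full; the proofs are below) =====
def Claim_equal_deal_dict : Prop := ∀ (word_dict : List (String × List String)) (result_dict : List (String × List String)), Dom_deal_dict word_dict result_dict → Pre_deal_dict word_dict result_dict → Spec_deal_dict word_dict result_dict (deal_dict word_dict result_dict)

-- ===== LEMMAS AND PROOFS =====

theorem aOut_toList (ws : List String) (acc : String) :
    (List.foldl (fun o out => o ++ out ++ " ") acc ws).toList
      = acc.toList ++ (ws.map (fun w => w.toList ++ [' '])).flatten := by
  induction ws generalizing acc with
  | nil => simp
  | cons w t ih => simp [ih, String.toList_append]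

theorem interc (ls : List (List Char)) (h : ls ≠ []) :
    List.intercalate [' '] ls ++ [' '] = (ls.map (fun l => l ++ [' '])).flatten := by
  induction ls with
  | nil => simp at h
  | cons l t ih =>
    cases t with
    | nil => simp [List.intercalate]
    | cons l2 t2 =>
      have hstep : List.intercalate [' '] (l :: l2 :: t2) = l ++ [' '] ++ List.intercalate [' '] (l2 :: t2) := by
        simp [List.intercalate, List.intersperse_cons₂]
      rw [hstep, List.append_assoc (l ++ [' ']), ih (by simp)]
      simp

theorem aOut_eq_join (ws : List String) (h : ws ≠ []) :
    aOut ws = PySem.Str.join " " ws ++ " " := by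
  rw [← String.toList_inj]
  rw [aOut, aOut_toList, String.toList_append, PySem.Str.toList_join]
  have : (" " : String).toList = [' '] := by decide
  rw [this]
  show _ = PySem.Chars.join [' '] (ws.map String.toList) ++ [' ']
  rw [PySem.Chars.join, interc _ (by simpa using h)]
  rw [List.map_map]
  rfl

theorem aOut_ne (w : String) (t : List String) : aOut (w :: t) ≠ "" := by
  intro hc
  have := congrArg String.toList hc
  rw [aOut, aOut_toList] at this
  simp at this

theorem contains_iff {s : PySem.Set String} {x : String} :
    PySem.Set.contains s x = true ↔ x ∈ s := by
  simp [PySem.Set.contains, List.contains_eq_mem]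

theorem inner_eq (al : List String) (kl : List String) (ks : PySem.Set String)
    (hks : ∀ x, x ∈ ks ↔ x ∈ kl) :
    (List.foldl bInnerStep (kl, ks) al).1 = aInner kl al ∧
    (∀ x, x ∈ (List.foldl bInnerStep (kl, ks) al).2 ↔
      x ∈ (List.foldl bInnerStep (kl, ks) al).1) := by
  induction al generalizing kl ks with
  | nil => exact ⟨rfl, hks⟩
  | cons a t ih =>
    simp only [List.foldl_cons, aInner] at *
    by_cases hmem : a ∈ kl
    · have hb : bInnerStep (kl, ks) a = (kl, ks) := by
        simp [bInnerStep, (hks a).mpr hmem]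
      rw [hb, if_neg (by simpa using hmem)]
      exact ih kl ks hks
    · have hb : bInnerStep (kl, ks) a = (kl ++ [a], PySem.Set.add ks a) := by
        simp [bInnerStep]
        intro hc
        exact absurd ((hks a).mp hc) hmem
      rw [hb, if_pos hmem]
      refine ih (kl ++ [a]) (PySem.Set.add ks a) ?_
      intro x
      rw [PySem.Set.mem_add, hks x]
      simp [or_comm]

theorem pass_eq (key : String) (d : PySem.Dict String (List String)) :
    ∀ (L : List (String × List String)) (ow kl : List String) (ks cl : PySem.Set String),
    (∀ p ∈ L, PySem.Dict.getD d p.1 [] = p.2) →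
    (∀ x, x ∈ ks ↔ x ∈ kl) →
    aPass key d (ow, kl) (L.map Prod.fst)
        = ((bPass key (ow, kl, ks, cl) L).1, (bPass key (ow, kl, ks, cl) L).2.1) ∧
    (∀ x, x ∈ (bPass key (ow, kl, ks, cl) L).2.2.1 ↔
        x ∈ (bPass key (ow, kl, ks, cl) L).2.1) ∧
    ∃ new, (bPass key (ow, kl, ks, cl) L).1 = ow ++ new ∧
      (∀ x, x ∈ (bPass key (ow, kl, ks, cl) L).2.2.2 ↔ (x ∈ cl ∨ x ∈ new)) := by
  intro L
  induction L with
  | nil =>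
    intro ow kl ks cl _ hks
    exact ⟨rfl, hks, [], by simp [bPass], by simp [bPass]⟩
  | cons p t ih =>
    intro ow kl ks cl hL hks
    obtain ⟨alpha, al⟩ := p
    have hget : PySem.Dict.getD d alpha [] = al := hL (alpha, al) (by simp)
    simp only [bPass, aPass, List.map_cons, List.foldl_cons] at *
    by_cases hcond : key ∈ al ∧ alpha ∈ kl
    · have hbs : bStep key (ow, kl, ks, cl) (alpha, al)
          = (ow ++ [alpha], (List.foldl bInnerStep (kl, ks) al).1,
             (List.foldl bInnerStep (kl, ks) al).2, PySem.Set.add cl alpha) := by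
        simp only [bStep]
        rw [if_pos ⟨hcond.1, contains_iff.mpr ((hks alpha).mpr hcond.2)⟩]
      have has : aStep key d (ow, kl) alpha = (ow ++ [alpha], aInner kl al) := by
        simp only [aStep, hget]
        rw [if_pos ⟨hcond.1, hcond.2⟩]
      obtain ⟨hq1, hq2⟩ := inner_eq al kl ks hks
      rw [hbs, has, ← hq1]
      obtain ⟨e1, e2, new, hnew, hcl⟩ :=
        ih (ow ++ [alpha]) (List.foldl bInnerStep (kl, ks) al).1
          (List.foldl bInnerStep (kl, ks) al).2 (PySem.Set.add cl alpha)
          (fun q hq => hL q (by simp [hq])) hq2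
      refine ⟨e1, e2, alpha :: new, ?_, ?_⟩
      · rw [hnew]; simp
      · intro x
        rw [hcl x, PySem.Set.mem_add]
        simp [or_comm, or_assoc]
        tauto
    · have hbs : bStep key (ow, kl, ks, cl) (alpha, al) = (ow, kl, ks, cl) := by
        simp only [bStep]
        rw [if_neg]
        intro hc
        exact hcond ⟨hc.1, (hks alpha).mp (contains_iff.mp hc.2)⟩
      have has : aStep key d (ow, kl) alpha = (ow, kl) := by
        simp only [aStep, hget]
        rw [if_neg hcond]
      rw [hbs, has]
      exact ih ow kl ks cl (fun q hq => hL q (by simp [hq])) hks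

-- A's pop loop filters the dict items
theorem aPops_items (key : String) (cs : List String) (d : PySem.Dict String (List String)) :
    (aPops key d cs).items
      = d.items.filter (fun p => p.1 == key || !(cs.contains p.1)) := by
  induction cs generalizing d with
  | nil => simp [aPops]
  | cons c cs ih =>
    simp only [aPops, List.foldl_cons] at *
    rw [ih]
    by_cases hck : c = key
    · subst hck
      rw [if_neg (by simp : ¬ (c ≠ c))]
      apply List.filter_congr
      intro p _
      by_cases h1 : p.1 = c <;> simp [h1]
    · rw [if_pos hck]
      simp only [PySem.Dict.erase, List.filter_filter]
      apply List.filter_congr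
      intro p _
      by_cases h1 : p.1 = key
      · simp [h1, (Ne.symm hck : key ≠ c)]
      · by_cases h2 : p.1 = c <;> simp [h1, h2, hck]

-- main round-by-round equivalence
theorem go_eq (l : List (String × List String)) (rd : PySem.Dict String (List String))
    (hnd : (l.map Prod.fst).Nodup) :
    deal_dict_go ⟨l⟩ rd = deal_dict_alt_go l rd := by
  match l with
  | [] =>
    rw [deal_dict_go, deal_dict_alt_go]
    simp [PySem.Dict.size]
  | [(k, v)] =>
    rw [deal_dict_go, deal_dict_alt_go]
    simp [PySem.Dict.size, PySem.Dict.keys, PySem.Dict.getD, PySem.Dict.get?]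
  | (key, vals) :: p0 :: t0 =>
    have hnd' : key ∉ (p0::t0).map Prod.fst ∧ ((p0::t0).map Prod.fst).Nodup := by
      have h0 := hnd
      rw [List.map_cons, List.nodup_cons] at h0
      exact h0
    have herase : PySem.Dict.erase (⟨(key,vals)::p0::t0⟩ : PySem.Dict String (List String)) key
        = (⟨p0::t0⟩ : PySem.Dict String (List String)) := by
      apply PySem.Dict.ext
      simp only [PySem.Dict.erase]
      show ((key,vals)::p0::t0).filter (fun p => !(p.1 == key)) = (p0::t0)
      rw [List.filter_cons_of_neg (by simp)]
      apply List.filter_eq_self.mpr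
      intro q hq
      have hq1 : q.1 ≠ key := by
        intro h
        exact hnd'.1 (h ▸ List.mem_map_of_mem hq)
      simp [hq1]
    have hkeys : PySem.Dict.keys (⟨p0::t0⟩ : PySem.Dict String (List String))
        = (p0::t0).map Prod.fst := rfl
    have hLd : ∀ q ∈ p0::t0, PySem.Dict.getD (⟨p0::t0⟩ : PySem.Dict String (List String)) q.1 [] = q.2 := by
      intro q hq
      exact PySem.Dict.getD_of_mem_items _ (by simpa using hq) (by simpa [hkeys] using hnd'.2) []
    obtain ⟨hA, hinv, new, hnew, hcl⟩ :=
      pass_eq key (⟨p0::t0⟩ : PySem.Dict String (List String)) (p0::t0) [key] vals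
        (PySem.Set.ofList vals) PySem.Set.empty hLd (fun x => PySem.Set.mem_ofList vals x)
    -- abbreviate B's pass result
    set st := bPass key ([key], vals, PySem.Set.ofList vals, PySem.Set.empty) (p0::t0) with hst
    have hmemst : ∀ x, x ∈ st.1 ↔ x = key ∨ x ∈ new := by
      intro x; rw [hnew]; simp
    -- the two next worklists coincide
    have hfilt : (if st.1.length ≠ 1 then aPops key (⟨p0::t0⟩ : PySem.Dict String (List String)) st.1
          else (⟨p0::t0⟩ : PySem.Dict String (List String)))
        = (⟨(p0::t0).filter (fun q => !(PySem.Set.contains st.2.2.2 q.1))⟩ :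
            PySem.Dict String (List String)) := by
      have hbq : ∀ q ∈ p0::t0, (!(PySem.Set.contains st.2.2.2 q.1)) = !(decide (q.1 ∈ new)) := by
        intro q hq
        have : PySem.Set.contains st.2.2.2 q.1 = decide (q.1 ∈ new) := by
          simp only [PySem.Set.contains, List.contains_eq_mem]
          rw [decide_eq_decide]
          rw [hcl q.1]
          simp [PySem.Set.empty]
        rw [this]
      by_cases hn : new = []
      · have h1 : st.1.length = 1 := by rw [hnew, hn]; rfl
        rw [if_neg (by simp [h1])]
        apply PySem.Dict.ext
        show (p0::t0) = _
        symm
        apply List.filter_eq_self.mpr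
        intro q hq
        rw [hbq q hq, hn]
        simp
      · have h1 : st.1.length ≠ 1 := by rw [hnew]; simp [hn]
        rw [if_pos h1]
        apply PySem.Dict.ext
        rw [aPops_items]
        change List.filter (fun p => p.1 == key || !st.1.contains p.1) (p0::t0)
            = List.filter (fun q => !(PySem.Set.contains st.2.2.2 q.1)) (p0::t0)
        refine List.filter_congr ?_
        intro q hq
        have hq1 : q.1 ≠ key := by
          intro h
          exact hnd'.1 (h ▸ List.mem_map_of_mem hq)
        rw [hbq q hq]
        simp [List.contains_eq_mem, hq1, hmemst q.1]
    -- unfold one round on each side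
    rw [deal_dict_go, deal_dict_alt_go]
    rw [if_pos (by simp [PySem.Dict.size] : 2 ≤ PySem.Dict.size (⟨(key,vals)::p0::t0⟩ : PySem.Dict String (List String)))]
    rw [if_neg (by simp : ¬ (p0::t0) = [])]
    simp only [show (PySem.Dict.keys (⟨(key,vals)::p0::t0⟩ : PySem.Dict String (List String))).headD "" = key from rfl,
      show PySem.Dict.getD (⟨(key,vals)::p0::t0⟩ : PySem.Dict String (List String)) key [] = vals by
        simp [PySem.Dict.getD, PySem.Dict.get?],
      herase, hkeys]
    rw [show aPass key (⟨p0::t0⟩ : PySem.Dict String (List String)) ([key], vals) ((p0::t0).map (fun x => x.1)) = (st.1, st.2.1) from hA]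
    have hout : aOut (st.1, st.2.1).1 = PySem.Str.join " " st.1 ++ " " := by
      apply aOut_eq_join
      rw [hnew]; simp
    have houtne : aOut (st.1, st.2.1).1 ≠ "" := by
      have : st.1 = key :: new := by rw [hnew]; rfl
      show aOut st.1 ≠ ""
      rw [this]
      exact aOut_ne _ _
    rw [if_pos houtne, hout]
    show deal_dict_go (if st.1.length ≠ 1 then _ else _) _ = _
    rw [hfilt]
    have hndf : (((p0::t0).filter (fun q => !(PySem.Set.contains st.2.2.2 q.1))).map Prod.fst).Nodup := by
      exact List.Nodup.sublist (List.Sublist.map Prod.fst List.filter_sublist) hnd'.2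
    exact go_eq ((p0::t0).filter (fun q => !(PySem.Set.contains st.2.2.2 q.1)))
      (PySem.Dict.insert rd (PySem.Str.join " " st.1 ++ " ") st.2.1) hndf
termination_by l.length
decreasing_by
  exact Nat.lt_succ_of_le (le_trans (List.length_filter_le _ _) (by simp))

-- ===== VERDICT (by name: the statement is the Claim_ definition above) =====
theorem deal_dict_spec : Claim_equal_deal_dict := by
  intro wd rd _hdom hpre
  unfold Spec_deal_dict deal_dict deal_dict_alt
  rw [go_eq wd ⟨rd⟩ hpre]
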